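-- pv_equiv track=rewrite | github.com/Code-W4YN3/Codility-Tests | pothole-problem/pothole.py | solution
-- ===== SOURCE A (Python) =====
-- def solution(R):
--     total_list = []
--     joined_holes= []
--     for i in R:
--         if i != 0:
--             joined_holes.append(i)
--         else:
--             joined_holes = []
--         if i not in total_list:
--             total_list.append(joined_holes)
--     max_list = []
--     for i in total_list:
--         if(len(i) > 0):
--             max_list.append((len(i)) * max(i))
--         else:
--             max_list.append(0)
--     return(max(max_list))
-- ===== SOURCE B (Python) =====
-- def solution(R):
--     # Single O(n) pass over the maximal non-zero runs: keep the current run's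
--     # length and maximum, flush its score (length * maximum) when the run ends.
--     best = None
--     run_len = 0
--     run_max = None
--     for x in R:
--         if x != 0:
--             run_max = x if run_len == 0 else max(run_max, x)
--             run_len += 1
--         elif run_len > 0:
--             score = run_len * run_max
--             best = score if best is None else max(best, score)
--             run_len = 0
--     if run_len > 0:
--         score = run_len * run_max
--         best = score if best is None else max(best, score)
--     return 0 if best is None else best
-- ===== Notes on version B (the rewrite author's own statement) =====
-- stated objective: faster
-- what changed: Replaced the quadratic aliased-list construction (total_list of references to joined_holes, each scored by a separate max() scan) with a single left-to-right pass that tracks the current non-zero run's length and maximum and the best run score.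
-- intended difference: On nonempty lists whose elements are all <= 0 with at least one negative and which end in 0 or contain two adjacent zeros, A returns 0 (the score of an empty run-slot left behind by list aliasing) while B returns the best (negative) run score, the intended maximum over non-zero runs. — e.g. on solution([-1, 0]): A returns 0, B returns -1
-- outside the precondition, e.g. on solution([]): A raises ValueError, B returns 0
import Mathlib
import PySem

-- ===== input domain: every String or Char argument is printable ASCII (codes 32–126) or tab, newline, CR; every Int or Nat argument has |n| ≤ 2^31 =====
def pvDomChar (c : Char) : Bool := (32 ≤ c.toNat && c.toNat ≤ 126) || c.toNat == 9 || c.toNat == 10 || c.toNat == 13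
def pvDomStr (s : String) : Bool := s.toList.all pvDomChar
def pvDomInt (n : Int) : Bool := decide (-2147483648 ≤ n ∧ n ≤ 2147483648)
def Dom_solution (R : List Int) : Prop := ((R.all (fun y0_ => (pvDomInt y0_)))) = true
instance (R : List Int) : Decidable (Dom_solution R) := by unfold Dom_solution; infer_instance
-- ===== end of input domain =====

-- B replaces A's quadratic aliased-list construction by one O(n) pass over the non-zero runs (return value only; A mutates no argument).

-- ===== PORT A =====
-- Python's total_list stores REFERENCES to the joined_holes object, which keeps being
-- mutated after insertion; we model each heap object as a (contents, reference-count) cell: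
-- `fin` are the cells abandoned by `joined_holes = []`, (cur, cnt) is the live cell.
-- `i not in total_list` compares an Int with lists, hence is always True, so every
-- iteration appends one more reference (cnt + 1; a fresh cell starts with count 1).
def solutionLoop : List Int → List (List Int × Nat) → List Int → Nat → List (List Int × Nat) × List Int × Nat
  | [], fin, cur, cnt => (fin, cur, cnt)
  | x :: xs, fin, cur, cnt =>
    if x ≠ 0 then solutionLoop xs fin (cur ++ [x]) (cnt + 1)
    else solutionLoop xs (fin ++ [(cur, cnt)]) [] 1

-- the second loop's body: (len(i)) * max(i) if len(i) > 0 else 0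
def solutionScore (l : List Int) : Int :=
  if 0 < l.length then (l.length : Int) * ((PySem.List.max? l (fun y => y)).getD 0) else 0

def solution (R : List Int) : Int :=
  match solutionLoop R [] [] 0 with
  | (fin, cur, cnt) =>
    -- total_list's final contents (cnt references to each cell), scored by the second loop
    (PySem.List.max? ((fin ++ [(cur, cnt)]).flatMap
        (fun p => List.replicate p.2 (solutionScore p.1))) (fun y => y)).getD 0
    -- max([]) raises ValueError: R = [] is excluded by Pre_

-- ===== PORT B =====
-- best = score if best is None else max(best, score)
def solutionMerge (b : Option Int) (c : Int) : Option Int :=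
  some (match b with | none => c | some v => max v c)

-- state: (best, run_len, run_max)
def solutionAltLoop : List Int → Option Int × Nat × Int → Option Int × Nat × Int
  | [], s => s
  | x :: xs, (best, rl, rm) =>
    if x ≠ 0 then
      solutionAltLoop xs (best, rl + 1, if rl = 0 then x else max rm x)
    else
      solutionAltLoop xs ((if 0 < rl then solutionMerge best ((rl : Int) * rm) else best), 0, rm)

def solution_alt (R : List Int) : Int :=
  match solutionAltLoop R (none, 0, 0) with
  | (best, rl, rm) =>
    ((if 0 < rl then solutionMerge best ((rl : Int) * rm) else best)).getD 0

-- ===== PRECONDITION & SPEC =====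
-- A raises ValueError (max() of the empty max_list) exactly on R = []; excluded.
def Pre_solution (R : List Int) : Prop := R ≠ []
instance (R : List Int) : Decidable (Pre_solution R) := by unfold Pre_solution; infer_instance
def pvWitness_solution : List Int := [0, 2, 3]

-- true iff R ends in 0 or contains two adjacent zeros (a zero not immediately followed by a non-zero)
def pvGapZero : List Int → Bool
  | [] => false
  | x :: xs => (decide (x = 0) && (match xs with | [] => true | y :: _ => decide (y = 0))) || pvGapZero xs

-- On nonempty lists whose elements are all ≤ 0 with at least one negative and which end in 0 or
-- contain two adjacent zeros, A returns 0 (the score of an empty run-slot left behind by list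
-- aliasing) while B returns the best (negative) run score, the intended maximum over non-zero runs.
def D_solution (R : List Int) : Prop :=
  pvGapZero R = true ∧ (∃ x ∈ R, x < 0) ∧ (∀ x ∈ R, x ≤ 0)
instance (R : List Int) : Decidable (D_solution R) := by unfold D_solution; infer_instance

def Spec_solution (R : List Int) (out : Int) : Prop := ¬ D_solution R → out = solution_alt R
instance (R : List Int) (out : Int) : Decidable (Spec_solution R out) := by unfold Spec_solution; infer_instance

def pvDiffWitness_solution : List Int := [-1, 0]
def pvDiffWitnessOut_solution : Int × Int := (0, -1)

-- ===== CLAIM (what is proved, stated in full; the proofs are below) =====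
def Claim_unchanged_solution : Prop := ∀ (R : List Int), Dom_solution R → Pre_solution R → Spec_solution R (solution R)
def Claim_changed_solution : Prop := Dom_solution (pvDiffWitness_solution) ∧ Pre_solution (pvDiffWitness_solution) ∧ D_solution (pvDiffWitness_solution) ∧ solution (pvDiffWitness_solution) = pvDiffWitnessOut_solution.1 ∧ solution_alt (pvDiffWitness_solution) = pvDiffWitnessOut_solution.2 ∧ pvDiffWitnessOut_solution.1 ≠ pvDiffWitnessOut_solution.2
def Claim_exact_solution : Prop := ∀ (R : List Int), Dom_solution R → Pre_solution R → D_solution R → solution R ≠ solution_alt R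

-- ===== LEMMAS AND PROOFS =====

-- ghost version of B's loop, additionally tracking he = "two adjacent zeros seen"
-- and pz = "last processed element was 0"; used only to couple A's loop with B's
def ghostLoop : List Int → Option Int × Bool × Bool × Nat × Int → Option Int × Bool × Bool × Nat × Int
  | [], s => s
  | x :: xs, (best, he, pz, rl, rm) =>
    if x ≠ 0 then
      ghostLoop xs (best, he, false, rl + 1, if rl = 0 then x else max rm x)
    else
      ghostLoop xs ((if 0 < rl then solutionMerge best ((rl : Int) * rm) else best), he || pz, true, 0, rm)

def pvOptMax : Option Int → Option Int → Option Int
  | none, b => b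
  | some a, none => some a
  | some a, some b => some (max a b)

def pvCells (fin : List (List Int × Nat)) : List Int :=
  fin.flatMap (fun p => List.replicate p.2 (solutionScore p.1))

def pvHe (he : Bool) : Option Int := if he then some 0 else none

-- coupling invariant between A's loop state and the ghost loop's state
def pvInv (fin : List (List Int × Nat)) (cur : List Int) (cnt : Nat)
    (best : Option Int) (he : Bool) (pz : Bool) (rl : Nat) (rm : Int) : Prop :=
  PySem.List.max? (pvCells fin) (fun y => y) = pvOptMax best (pvHe he)
  ∧ cur.length = rl
  ∧ (0 < rl → PySem.List.max? cur (fun y => y) = some rm)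
  ∧ (cnt = 0 ↔ (rl = 0 ∧ pz = false))
  ∧ (0 < rl → pz = false)

lemma pv_max?_nil : PySem.List.max? ([] : List Int) (fun y => y) = none := by
  simp [PySem.List.max?]

lemma pv_optmax_none (a : Option Int) : pvOptMax a none = a := by
  cases a <;> rfl

lemma pv_foldl_max_max (u : List Int) (a b : Int) :
    u.foldl max (max a b) = max a (u.foldl max b) := by
  induction u generalizing b with
  | nil => simp
  | cons c u ih => simp only [List.foldl, max_assoc]; exact ih (max b c)

lemma pv_max?_append (a b : List Int) :
    PySem.List.max? (a ++ b) (fun y => y) =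
      pvOptMax (PySem.List.max? a (fun y => y)) (PySem.List.max? b (fun y => y)) := by
  cases a with
  | nil => simp [pv_max?_nil, pvOptMax]
  | cons x t =>
    cases b with
    | nil => simp [pv_max?_nil, PySem.List.max?_id_cons, pvOptMax]
    | cons y u =>
      simp only [List.cons_append, PySem.List.max?_id_cons, pvOptMax, List.foldl_append,
        List.foldl]
      rw [← pv_foldl_max_max]

lemma pv_foldl_max_replicate (k : Nat) (x : Int) : (List.replicate k x).foldl max x = x := by
  induction k with
  | zero => rfl
  | succ m ih => simpa [List.replicate_succ, List.foldl] using ih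

lemma pv_max?_replicate (n : Nat) (x : Int) :
    PySem.List.max? (List.replicate n x) (fun y => y) = if n = 0 then none else some x := by
  cases n with
  | zero => simp [pv_max?_nil]
  | succ k =>
    simp [List.replicate_succ, PySem.List.max?_id_cons, pv_foldl_max_replicate]

lemma pv_score_nil : solutionScore ([] : List Int) = 0 := by
  simp [solutionScore]

lemma pv_score_run (cur : List Int) (rl : Nat) (rm : Int) (h : cur.length = rl)
    (hm : PySem.List.max? cur (fun y => y) = some rm) (hrl : 0 < rl) :
    solutionScore cur = (rl : Int) * rm := by
  simp [solutionScore, h, hrl, hm]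

lemma pv_cells_append (fin : List (List Int × Nat)) (cur : List Int) (cnt : Nat) :
    PySem.List.max? (pvCells (fin ++ [(cur, cnt)])) (fun y => y) =
      pvOptMax (PySem.List.max? (pvCells fin) (fun y => y))
        (PySem.List.max? (List.replicate cnt (solutionScore cur)) (fun y => y)) := by
  simp only [pvCells, List.flatMap_append, List.flatMap_cons, List.flatMap_nil, List.append_nil]
  exact pv_max?_append _ _

lemma pv_optmax_flush (best : Option Int) (he : Bool) (s : Int) :
    pvOptMax (pvOptMax best (pvHe he)) (some s) = pvOptMax (solutionMerge best s) (pvHe he) := by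
  cases best <;> cases he <;>
    simp [pvOptMax, pvHe, solutionMerge, max_comm]

lemma pv_optmax_zero (best : Option Int) (he : Bool) :
    pvOptMax (pvOptMax best (pvHe he)) (some 0) = pvOptMax best (pvHe true) := by
  cases best <;> cases he <;> simp [pvOptMax, pvHe]

lemma pv_loop_inv : ∀ (xs : List Int) (fin : List (List Int × Nat)) (cur : List Int)
    (cnt : Nat) (best : Option Int) (he pz : Bool) (rl : Nat) (rm : Int),
    pvInv fin cur cnt best he pz rl rm →
    (match solutionLoop xs fin cur cnt, ghostLoop xs (best, he, pz, rl, rm) with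
     | (fin', cur', cnt'), (best', he', pz', rl', rm') =>
        pvInv fin' cur' cnt' best' he' pz' rl' rm') := by
  intro xs
  induction xs with
  | nil =>
    intro fin cur cnt best he pz rl rm h
    simpa [solutionLoop, ghostLoop] using h
  | cons x xs ih =>
    intro fin cur cnt best he pz rl rm h
    obtain ⟨hE, hlen, hmax, hcnt, hpz⟩ := h
    by_cases hx : x = 0
    · -- zero step: flush the live cell, open a fresh one with one reference
      subst hx
      simp only [solutionLoop, ghostLoop, ne_eq, not_true_eq_false, if_false]
      apply ih
      refine ⟨?_, rfl, by simp, by simp, by simp⟩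
      rw [pv_cells_append, hE]
      by_cases hrl : 0 < rl
      · have hpzf := hpz hrl
        subst hpzf
        have hc : cnt ≠ 0 := fun h0 => absurd (hcnt.mp h0).1 (by omega)
        rw [pv_max?_replicate, if_neg hc,
          pv_score_run cur rl rm hlen (hmax hrl) hrl, if_pos hrl, Bool.or_false]
        exact pv_optmax_flush best he _
      · have hrl0 : rl = 0 := by omega
        have hcur : cur = [] := by
          cases cur with
          | nil => rfl
          | cons a t => rw [hrl0] at hlen; simp at hlen
        subst hcur
        cases pz with
        | true =>
          have hc : cnt ≠ 0 := fun h0 => by simpa using (hcnt.mp h0).2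
          rw [pv_max?_replicate, if_neg hc, pv_score_nil, if_neg hrl, Bool.or_true]
          exact pv_optmax_zero best he
        | false =>
          have hc0 : cnt = 0 := hcnt.mpr ⟨hrl0, rfl⟩
          rw [hc0, pv_max?_replicate, if_pos rfl, pv_optmax_none, if_neg hrl, Bool.or_false]
    · -- nonzero step: the run grows, one more reference to the live cell
      simp only [solutionLoop, ghostLoop, ne_eq, hx, not_false_eq_true, if_true]
      apply ih
      refine ⟨hE, by simp [hlen], ?_, by simp, by simp⟩
      intro _
      rw [pv_max?_append]
      by_cases hrl : 0 < rl
      · rw [hmax hrl]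
        have h0 : ¬ rl = 0 := by omega
        simp [pvOptMax, PySem.List.max?_id_cons, h0]
      · have hrl0 : rl = 0 := by omega
        have hcur : cur = [] := by
          cases cur with
          | nil => rfl
          | cons a t => rw [hrl0] at hlen; simp at hlen
        subst hcur
        simp [pv_max?_nil, pvOptMax, PySem.List.max?_id_cons, hrl0]

-- after a nonempty input the ghost loop ends with a live run or a pending zero
lemma pv_ghost_ends : ∀ (xs : List Int) (best : Option Int) (he pz : Bool) (rl : Nat) (rm : Int),
    (0 < rl ∨ pz = true) →
    (match ghostLoop xs (best, he, pz, rl, rm) with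
     | (_, _, pz', rl', _) => 0 < rl' ∨ pz' = true) := by
  intro xs
  induction xs with
  | nil =>
    intro best he pz rl rm h
    simpa [ghostLoop] using h
  | cons x xs ih =>
    intro best he pz rl rm _
    by_cases hx : x = 0
    · subst hx
      simp only [ghostLoop, ne_eq, not_true_eq_false, if_false]
      exact ih _ _ _ _ _ (Or.inr rfl)
    · simp only [ghostLoop, ne_eq, hx, not_false_eq_true, if_true]
      exact ih _ _ _ _ _ (Or.inl (by omega))

-- extract the equality of the two finishing computations from the invariant
lemma pv_finish (fin : List (List Int × Nat)) (cur : List Int) (cnt : Nat)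
    (best : Option Int) (he pz : Bool) (rl : Nat) (rm : Int)
    (h : pvInv fin cur cnt best he pz rl rm) (hend : 0 < rl ∨ pz = true) :
    (PySem.List.max? (pvCells (fin ++ [(cur, cnt)])) (fun y => y)).getD 0 =
      (if he || pz then
        (match (if 0 < rl then solutionMerge best ((rl : Int) * rm) else best) with
         | none => 0 | some v => max v 0)
       else (if 0 < rl then solutionMerge best ((rl : Int) * rm) else best).getD 0) := by
  obtain ⟨hE, hlen, hmax, hcnt, hpz⟩ := h
  rw [pv_cells_append, hE]
  by_cases hrl : 0 < rl
  · have hpzf := hpz hrl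
    subst hpzf
    have hc : cnt ≠ 0 := fun h0 => absurd (hcnt.mp h0).1 (by omega)
    rw [pv_max?_replicate, if_neg hc, pv_score_run cur rl rm hlen (hmax hrl) hrl,
      pv_optmax_flush, if_pos hrl, Bool.or_false]
    cases he <;> simp [solutionMerge, pvHe, pvOptMax]
  · have hrl0 : rl = 0 := by omega
    have hpzt : pz = true := by
      rcases hend with h | h
      · omega
      · exact h
    subst hpzt
    have hcur : cur = [] := by
      cases cur with
      | nil => rfl
      | cons a t => rw [hrl0] at hlen; simp at hlen
    subst hcur
    have hc : cnt ≠ 0 := fun h0 => by simpa using (hcnt.mp h0).2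
    rw [pv_max?_replicate, if_neg hc, pv_score_nil, pv_optmax_zero, if_neg hrl, Bool.or_true]
    simp only [if_true]
    cases best <;> simp [pvOptMax, pvHe]

-- the ghost loop is B's loop plus the two flags
lemma pv_ghost_proj : ∀ (xs : List Int) (best : Option Int) (he pz : Bool) (rl : Nat) (rm : Int),
    (match ghostLoop xs (best, he, pz, rl, rm) with
     | (b, _, _, l, m) => ((b, l, m) : Option Int × Nat × Int)) =
      solutionAltLoop xs (best, rl, rm) := by
  intro xs
  induction xs with
  | nil => intro best he pz rl rm; simp [ghostLoop, solutionAltLoop]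
  | cons x xs ih =>
    intro best he pz rl rm
    by_cases hx : x = 0
    · subst hx
      simp only [ghostLoop, solutionAltLoop, ne_eq, not_true_eq_false, if_false]
      exact ih _ _ _ _ _
    · simp only [ghostLoop, solutionAltLoop, ne_eq, hx, not_false_eq_true, if_true]
      exact ih _ _ _ _ _

-- pvZStart xs: the next processed element is 0 (or the input ends)
def pvZStart : List Int → Bool
  | [] => true
  | y :: _ => decide (y = 0)

-- the ghost flags compute exactly pvGapZero
lemma pv_ghost_flags : ∀ (xs : List Int) (best : Option Int) (he pz : Bool) (rl : Nat) (rm : Int),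
    ((ghostLoop xs (best, he, pz, rl, rm)).2.1 || (ghostLoop xs (best, he, pz, rl, rm)).2.2.1) =
      (he || (pz && pvZStart xs) || pvGapZero xs) := by
  intro xs
  induction xs with
  | nil => intro best he pz rl rm; simp [ghostLoop, pvZStart, pvGapZero]
  | cons x xs ih =>
    intro best he pz rl rm
    by_cases hx : x = 0
    · subst hx
      simp only [ghostLoop, ne_eq, not_true_eq_false, if_false]
      rw [ih]
      simp only [pvZStart, pvGapZero, decide_true, Bool.true_and]
      cases xs with
      | nil => cases he <;> cases pz <;> simp
      | cons y t => cases he <;> cases pz <;> by_cases hy : y = 0 <;> simp [hy]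
    · simp only [ghostLoop, ne_eq, hx, not_false_eq_true, if_true]
      rw [ih]
      simp [pvZStart, pvGapZero, hx]

-- the main bridge: on a nonempty input, A equals B clamped at 0 exactly when pvGapZero holds
lemma pv_main (R : List Int) (hne : R ≠ []) :
    solution R = if pvGapZero R then max (solution_alt R) 0 else solution_alt R := by
  have hinv0 : pvInv [] [] 0 none false false 0 0 :=
    ⟨by simp [pvCells, pvOptMax, pvHe, pv_max?_nil], rfl, by simp, by simp, by simp⟩
  have hinv := pv_loop_inv R [] [] 0 none false false 0 0 hinv0
  have hends : (match ghostLoop R (none, false, false, 0, 0) with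
      | (_, _, pz', rl', _) => 0 < rl' ∨ pz' = true) := by
    cases R with
    | nil => exact absurd rfl hne
    | cons x xs =>
      by_cases hx : x = 0
      · subst hx
        simp only [ghostLoop, ne_eq, not_true_eq_false, if_false]
        exact pv_ghost_ends xs _ _ _ _ _ (Or.inr rfl)
      · simp only [ghostLoop, ne_eq, hx, not_false_eq_true, if_true]
        exact pv_ghost_ends xs _ _ _ _ _ (Or.inl (by omega))
  have hproj := pv_ghost_proj R none false false 0 0
  have hflags := pv_ghost_flags R none false false 0 0
  rcases hA : solutionLoop R [] [] 0 with ⟨fin, cur, cnt⟩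
  rcases hG : ghostLoop R (none, false, false, 0, 0) with ⟨best, he, pz, rl, rm⟩
  rw [hA, hG] at hinv
  rw [hG] at hends hproj hflags
  simp only [Bool.false_and, Bool.false_or] at hflags
  have hfin := pv_finish fin cur cnt best he pz rl rm hinv hends
  have halt : solution_alt R =
      (if 0 < rl then solutionMerge best ((rl : Int) * rm) else best).getD 0 := by
    simp only [solution_alt, ← hproj]
  simp only [solution, hA, pvCells] at hfin ⊢
  rw [hfin, hflags, halt]
  rcases hB : (if 0 < rl then solutionMerge best ((rl : Int) * rm) else best) with _ | v
  · cases hgz : pvGapZero R <;> simp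
  · cases hgz : pvGapZero R <;> simp

-- non-negative inputs give a non-negative best
lemma pv_alt_nonneg : ∀ (xs : List Int) (best : Option Int) (rl : Nat) (rm : Int),
    (∀ x ∈ xs, 0 ≤ x) → (∀ v, best = some v → 0 ≤ v) → (0 < rl → 0 < rm) →
    0 ≤ (match solutionAltLoop xs (best, rl, rm) with
         | (b, l, m) => (if 0 < l then solutionMerge b ((l : Int) * m) else b).getD 0) := by
  intro xs
  induction xs with
  | nil =>
    intro best rl rm _ hb hrm
    simp only [solutionAltLoop]
    by_cases hrl : 0 < rl
    · have := hrm hrl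
      cases best with
      | none => simp [hrl, solutionMerge]; positivity
      | some v =>
        have hv := hb v rfl
        simp only [hrl, if_pos, solutionMerge, Option.getD_some]
        have : (0:Int) ≤ (rl : Int) * rm := by positivity
        exact le_max_of_le_left hv
    · cases best with
      | none => simp [hrl]
      | some v => simpa [hrl] using hb v rfl
  | cons x xs ih =>
    intro best rl rm hall hb hrm
    have hx0 : 0 ≤ x := hall x (by simp)
    by_cases hx : x = 0
    · subst hx
      simp only [solutionAltLoop, ne_eq, not_true_eq_false, if_false]
      apply ih _ _ _ (fun y hy => hall y (by simp [hy]))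
      · intro v hv
        by_cases hrl : 0 < rl
        · simp only [hrl, if_pos, solutionMerge] at hv
          have hrm' := hrm hrl
          cases best with
          | none =>
            simp only [Option.some.injEq] at hv
            subst hv; positivity
          | some w =>
            simp only [Option.some.injEq] at hv
            subst hv
            exact le_max_of_le_left (hb w rfl)
        · simp only [hrl, if_false] at hv
          exact hb v hv
      · intro h; omega
    · simp only [solutionAltLoop, ne_eq, hx, not_false_eq_true, if_true]
      apply ih _ _ _ (fun y hy => hall y (by simp [hy])) hb
      intro _
      have hxpos : 0 < x := lt_of_le_of_ne hx0 (Ne.symm hx)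
      by_cases hrl : rl = 0
      · simpa [hrl] using hxpos
      · have := hrm (by omega)
        simp only [hrl, if_false]
        exact lt_max_of_lt_left this

-- a positive element somewhere also gives a non-negative best
lemma pv_alt_pos : ∀ (xs : List Int) (best : Option Int) (rl : Nat) (rm : Int),
    ((∃ x ∈ xs, 0 < x) ∨ (∃ v, best = some v ∧ 0 ≤ v) ∨ (0 < rl ∧ 0 < rm)) →
    0 ≤ (match solutionAltLoop xs (best, rl, rm) with
         | (b, l, m) => (if 0 < l then solutionMerge b ((l : Int) * m) else b).getD 0) := by
  intro xs
  induction xs with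
  | nil =>
    intro best rl rm h
    simp only [solutionAltLoop]
    rcases h with ⟨x, hx, _⟩ | ⟨v, hv, hv0⟩ | ⟨hrl, hrm⟩
    · simp at hx
    · subst hv
      by_cases hrl : 0 < rl
      · simp only [hrl, if_pos, solutionMerge, Option.getD_some]
        exact le_max_of_le_left hv0
      · simpa [hrl] using hv0
    · have hs : (0:Int) < (rl : Int) * rm := by positivity
      cases best with
      | none => simp [hrl, solutionMerge]; omega
      | some v =>
        simp only [hrl, if_pos, solutionMerge, Option.getD_some]
        exact le_max_of_le_right hs.le
  | cons x xs ih =>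
    intro best rl rm h
    by_cases hx : x = 0
    · subst hx
      simp only [solutionAltLoop, ne_eq, not_true_eq_false, if_false]
      apply ih
      rcases h with ⟨y, hy, hy0⟩ | ⟨v, hv, hv0⟩ | ⟨hrl, hrm⟩
      · rcases List.mem_cons.mp hy with rfl | hy'
        · omega
        · exact Or.inl ⟨y, hy', hy0⟩
      · subst hv
        refine Or.inr (Or.inl ?_)
        by_cases hrl : 0 < rl
        · exact ⟨max v ((rl:Int)*rm), by simp [hrl, solutionMerge], le_max_of_le_left hv0⟩
        · exact ⟨v, by simp [hrl], hv0⟩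
      · have hs : (0:Int) < (rl : Int) * rm := by positivity
        refine Or.inr (Or.inl ?_)
        cases best with
        | none => exact ⟨(rl:Int)*rm, by simp [hrl, solutionMerge], hs.le⟩
        | some v => exact ⟨max v ((rl:Int)*rm), by simp [hrl, solutionMerge], le_max_of_le_right hs.le⟩
    · simp only [solutionAltLoop, ne_eq, hx, not_false_eq_true, if_true]
      apply ih
      rcases h with ⟨y, hy, hy0⟩ | ⟨v, hv, hv0⟩ | ⟨hrl, hrm⟩
      · rcases List.mem_cons.mp hy with rfl | hy'
        · refine Or.inr (Or.inr ⟨by omega, ?_⟩)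
          by_cases hrl : rl = 0
          · simpa [hrl] using hy0
          · simp only [hrl, if_false]
            exact lt_max_of_lt_right hy0
        · exact Or.inl ⟨y, hy', hy0⟩
      · exact Or.inr (Or.inl ⟨v, hv, hv0⟩)
      · refine Or.inr (Or.inr ⟨by omega, ?_⟩)
        have h0 : ¬ rl = 0 := by omega
        simp only [h0, if_false]
        exact lt_max_of_lt_left hrm

-- all elements ≤ 0 with a negative present: the best run score is strictly negative
lemma pv_alt_neg : ∀ (xs : List Int) (best : Option Int) (rl : Nat) (rm : Int),
    (∀ x ∈ xs, x ≤ 0) → (∀ v, best = some v → v < 0) → (0 < rl → rm < 0) →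
    ((∃ x ∈ xs, x < 0) ∨ best ≠ none ∨ 0 < rl) →
    ∃ v, (match solutionAltLoop xs (best, rl, rm) with
          | (b, l, m) => (if 0 < l then solutionMerge b ((l : Int) * m) else b)) = some v ∧ v < 0 := by
  intro xs
  induction xs with
  | nil =>
    intro best rl rm _ hb hrm hsome
    simp only [solutionAltLoop]
    by_cases hrl : 0 < rl
    · have hrm' := hrm hrl
      have hs : (rl : Int) * rm < 0 := by
        apply mul_neg_of_pos_of_neg _ hrm'
        exact_mod_cast hrl
      cases best with
      | none => exact ⟨(rl:Int)*rm, by simp [hrl, solutionMerge], hs⟩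
      | some v => exact ⟨max v ((rl:Int)*rm), by simp [hrl, solutionMerge],
          max_lt (hb v rfl) hs⟩
    · rcases hsome with ⟨x, hx, _⟩ | hb' | h
      · simp at hx
      · cases best with
        | none => exact absurd rfl hb'
        | some v => exact ⟨v, by simp [hrl], hb v rfl⟩
      · omega
  | cons x xs ih =>
    intro best rl rm hall hb hrm hsome
    have hx0 : x ≤ 0 := hall x (by simp)
    by_cases hx : x = 0
    · subst hx
      simp only [solutionAltLoop, ne_eq, not_true_eq_false, if_false]
      apply ih _ _ _ (fun y hy => hall y (by simp [hy]))
      · intro v hv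
        by_cases hrl : 0 < rl
        · have hrm' := hrm hrl
          have hs : (rl : Int) * rm < 0 := by
            apply mul_neg_of_pos_of_neg _ hrm'
            exact_mod_cast hrl
          cases best with
          | none =>
            simp only [hrl, if_pos, solutionMerge, Option.some.injEq] at hv
            omega
          | some w =>
            simp only [hrl, if_pos, solutionMerge, Option.some.injEq] at hv
            subst hv
            exact max_lt (hb w rfl) hs
        · simp only [hrl, if_false] at hv
          exact hb v hv
      · intro h; omega
      · rcases hsome with ⟨y, hy, hy0⟩ | hb' | hrl
        · rcases List.mem_cons.mp hy with rfl | hy'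
          · omega
          · exact Or.inl ⟨y, hy', hy0⟩
        · refine Or.inr (Or.inl ?_)
          by_cases hrl : 0 < rl <;> simp [hrl, solutionMerge]
          cases best with
          | none => simp at hb'
          | some v => simp
        · refine Or.inr (Or.inl ?_)
          simp [hrl, solutionMerge]
    · have hxneg : x < 0 := lt_of_le_of_ne hx0 hx
      simp only [solutionAltLoop, ne_eq, hx, not_false_eq_true, if_true]
      apply ih _ _ _ (fun y hy => hall y (by simp [hy])) hb
      · intro _
        by_cases hrl : rl = 0
        · simpa [hrl] using hxneg
        · have := hrm (by omega)
          simp only [hrl, if_false]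
          exact max_lt this hxneg
      · exact Or.inr (Or.inr (by omega))

lemma pv_alt_nonneg_top (R : List Int) (h : (∀ x ∈ R, 0 ≤ x) ∨ (∃ x ∈ R, 0 < x)) :
    0 ≤ solution_alt R := by
  simp only [solution_alt]
  rcases h with h | h
  · exact pv_alt_nonneg R none 0 0 h (by simp) (by omega)
  · exact pv_alt_pos R none 0 0 (Or.inl h)

lemma pv_alt_neg_top (R : List Int) (hall : ∀ x ∈ R, x ≤ 0) (hneg : ∃ x ∈ R, x < 0) :
    solution_alt R < 0 := by
  obtain ⟨v, hv, hv0⟩ := pv_alt_neg R none 0 0 hall (by simp) (by omega) (Or.inl hneg)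
  simp only [solution_alt]
  rcases hL : solutionAltLoop R (none, 0, 0) with ⟨b, l, m⟩
  rw [hL] at hv
  simp only [hv, Option.getD_some]
  exact hv0

-- ===== VERDICT (by name: the statement is the Claim_ definition above) =====
theorem solution_spec : Claim_unchanged_solution := by
  intro R _ hpre hnD
  rw [pv_main R hpre]
  by_cases hgz : pvGapZero R = true
  · rw [if_pos hgz]
    have h0 : 0 ≤ solution_alt R := by
      apply pv_alt_nonneg_top
      by_cases hneg : ∃ x ∈ R, x < 0
      · by_cases hpos : ∀ x ∈ R, x ≤ 0
        · exact absurd ⟨hgz, hneg, hpos⟩ hnD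
        · rw [not_forall] at hpos
          obtain ⟨x, hx⟩ := hpos
          rw [Classical.not_imp, not_le] at hx
          exact Or.inr ⟨x, hx.1, hx.2⟩
      · refine Or.inl fun x hx => le_of_not_gt fun hlt => hneg ⟨x, hx, hlt⟩
    omega
  · rw [if_neg hgz]

theorem solution_changed : Claim_changed_solution := by
  unfold Claim_changed_solution; decide

theorem solution_tight : Claim_exact_solution := by
  intro R _ hpre hD
  obtain ⟨hgz, hneg, hall⟩ := hD
  have hlt := pv_alt_neg_top R hall hneg
  rw [pv_main R hpre, if_pos hgz]
  omega
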